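-- pv_equiv track=rewrite | github.com/baileyp/advent-of-code-2020 | aoc/solution/day10.py | find_contiguous_1_jolt_diffs
-- ===== SOURCE A (Python) =====
-- def find_contiguous_1_jolt_diffs(jolts):
--     contiguous = [0]
--     rating = 0
--     for jolt in jolts:
--         if jolt - rating == 1:
--             contiguous.append(jolt)
--         else:
--             if len(contiguous) > 2:
--                 yield contiguous
--             contiguous = [jolt]
--         rating = jolt
--     if len(contiguous) > 2:
--         yield contiguous
-- ===== SOURCE B (Python) =====
-- def find_contiguous_1_jolt_diffs(jolts):
--     # Backward pass: build all maximal +1-runs of the 0-prefixed jolt list at once (newest run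
--     # kept last, each run in forward order), then emit the runs longer than 2.
--     full = [0] + list(jolts)
--     rgroups = []  # the runs of full, in reverse order
--     for x in reversed(full):
--         if rgroups and rgroups[-1][0] - x == 1:
--             rgroups[-1] = [x] + rgroups[-1]
--         else:
--             rgroups.append([x])
--     for run in reversed(rgroups):
--         if len(run) > 2:
--             yield run
-- ===== Notes on version B (the rewrite author's own statement) =====
-- stated objective: alternative
-- what changed: Replaces A's forward state machine (current run + previous rating, yielding each run as it closes) by a backward pass that first builds the complete list of maximal +1-runs of the 0-prefixed jolt list by prepending to the latest run, then filters the runs longer than 2 in a second pass.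
import Mathlib
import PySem

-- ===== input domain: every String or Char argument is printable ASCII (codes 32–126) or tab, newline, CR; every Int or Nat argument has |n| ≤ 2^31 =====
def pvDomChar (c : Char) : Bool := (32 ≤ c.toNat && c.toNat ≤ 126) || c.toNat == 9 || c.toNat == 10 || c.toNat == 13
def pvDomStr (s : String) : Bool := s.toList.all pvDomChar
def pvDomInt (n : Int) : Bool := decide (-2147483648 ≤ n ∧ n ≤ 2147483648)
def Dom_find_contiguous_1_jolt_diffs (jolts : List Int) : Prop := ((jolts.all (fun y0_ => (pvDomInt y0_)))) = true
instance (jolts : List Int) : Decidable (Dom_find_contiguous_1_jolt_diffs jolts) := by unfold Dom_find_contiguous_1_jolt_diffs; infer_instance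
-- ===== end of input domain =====

-- B builds all maximal +1-runs of the 0-prefixed jolt list in one backward pass and filters them afterwards,
-- instead of A's forward state machine; objective: alternative (same cost, different traversal).

-- ===== PORT A =====
-- the for-loop of A as structural recursion over the same state (out = values yielded so far)
def pvLoopA (out : List (List Int)) (contiguous : List Int) (rating : Int) : List Int → List (List Int)
  | [] => if contiguous.length > 2 then out ++ [contiguous] else out
  | jolt :: rest =>
    if jolt - rating = 1 then
      pvLoopA out (contiguous ++ [jolt]) jolt rest
    else
      pvLoopA (if contiguous.length > 2 then out ++ [contiguous] else out) [jolt] jolt rest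

def find_contiguous_1_jolt_diffs (jolts : List Int) : List (List Int) :=
  pvLoopA [] [0] 0 jolts

-- ===== PORT B =====
-- rgroups[-1] → getLastD [], rgroups[-1][0] → headD 0: both accesses are guarded by
-- `rgroups ≠ []` and every stored run is nonempty, so the defaults are never consulted.
def find_contiguous_1_jolt_diffs_alt (jolts : List Int) : List (List Int) :=
  let full : List Int := [0] ++ jolts
  let rgroups : List (List Int) :=
    full.reverse.foldl
      (fun rgroups x =>
        if rgroups ≠ [] ∧ (rgroups.getLastD []).headD 0 - x = 1 then
          rgroups.dropLast ++ [x :: rgroups.getLastD []]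
        else
          rgroups ++ [[x]]) []
  rgroups.reverse.foldl (fun acc run => if run.length > 2 then acc ++ [run] else acc) []

-- ===== PRECONDITION & SPEC =====
def Spec_find_contiguous_1_jolt_diffs (jolts : List Int) (out : List (List Int)) : Prop := out = find_contiguous_1_jolt_diffs_alt jolts
instance (jolts : List Int) (out : List (List Int)) : Decidable (Spec_find_contiguous_1_jolt_diffs jolts out) := by unfold Spec_find_contiguous_1_jolt_diffs; infer_instance

-- ===== CLAIM (what is proved, stated in full; the proofs are below) =====
def Claim_equal_find_contiguous_1_jolt_diffs : Prop := ∀ (jolts : List Int), Dom_find_contiguous_1_jolt_diffs jolts → Spec_find_contiguous_1_jolt_diffs jolts (find_contiguous_1_jolt_diffs jolts)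

-- ===== LEMMAS AND PROOFS =====

-- the maximal +1-runs of a list, by right recursion (proof-only reference function)
def pvRuns : List Int → List (List Int)
  | [] => []
  | x :: xs =>
    match pvRuns xs with
    | g :: gs => if g.headD 0 - x = 1 then (x :: g) :: gs else [x] :: g :: gs
    | [] => [[x]]

-- B's backward fold builds pvRuns, reversed
theorem pvFoldr_eq_runs_reverse (l : List Int) :
    l.foldr (fun x s =>
      if s ≠ [] ∧ (s.getLastD []).headD 0 - x = 1 then
        s.dropLast ++ [x :: s.getLastD []]
      else s ++ [[x]]) [] = (pvRuns l).reverse := by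
  induction l with
  | nil => simp [pvRuns]
  | cons x xs ih =>
    simp only [List.foldr_cons, ih, pvRuns]
    cases h : pvRuns xs with
    | nil => simp
    | cons g gs =>
      by_cases hd : g.head?.getD 0 - x = 1 <;>
        simp [hd]

-- A's loop, characterised by pvRuns seeded with the running group `cur ++ [r]`
def pvMapHead (f : List Int → List Int) : List (List Int) → List (List Int)
  | [] => []
  | g :: gs => f g :: gs

theorem pvRuns_cons_shape (x : Int) (l : List Int) :
    ∃ t gs, pvRuns (x :: l) = (x :: t) :: gs := by
  simp only [pvRuns]
  cases pvRuns l with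
  | nil => exact ⟨[], [], rfl⟩
  | cons g gs =>
    by_cases hd : g.head?.getD 0 - x = 1
    · exact ⟨g, gs, by simp [hd]⟩
    · exact ⟨[], g :: gs, by simp [hd]⟩

def pvRunsFrom (cur : List Int) (rating : Int) : List Int → List (List Int)
  | [] => [cur]
  | j :: rest =>
    if j - rating = 1 then pvRunsFrom (cur ++ [j]) j rest
    else cur :: pvRunsFrom [j] j rest

theorem pvRunsFrom_eq_mapHead (xs : List Int) : ∀ (cur : List Int) (r : Int),
    pvRunsFrom (cur ++ [r]) r xs = pvMapHead (fun g => cur ++ g) (pvRuns (r :: xs)) := by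
  induction xs with
  | nil => intro cur r; simp [pvRunsFrom, pvRuns, pvMapHead]
  | cons x xs ih =>
    intro cur r
    obtain ⟨t, gs, ht⟩ := pvRuns_cons_shape x xs
    have hrr : pvRuns (r :: x :: xs) =
        if x - r = 1 then (r :: x :: t) :: gs else [r] :: (x :: t) :: gs := by
      rw [show pvRuns (r :: x :: xs) = (match pvRuns (x :: xs) with
        | g :: gs => if g.headD 0 - r = 1 then (r :: g) :: gs else [r] :: g :: gs
        | [] => [[r]]) from rfl, ht]
      simp
    by_cases hd : x - r = 1
    · calc pvRunsFrom (cur ++ [r]) r (x :: xs)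
          = pvRunsFrom ((cur ++ [r]) ++ [x]) x xs := by simp [pvRunsFrom, hd]
        _ = pvMapHead (fun g => (cur ++ [r]) ++ g) (pvRuns (x :: xs)) := ih _ _
        _ = pvMapHead (fun g => cur ++ g) (pvRuns (r :: x :: xs)) := by
            rw [ht, hrr, if_pos hd]; simp [pvMapHead]
    · have h2 := ih [] x
      simp only [List.nil_append] at h2
      calc pvRunsFrom (cur ++ [r]) r (x :: xs)
          = (cur ++ [r]) :: pvRunsFrom [x] x xs := by simp [pvRunsFrom, hd]
        _ = (cur ++ [r]) :: pvMapHead (fun g => g) (pvRuns (x :: xs)) := by rw [h2]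
        _ = pvMapHead (fun g => cur ++ g) (pvRuns (r :: x :: xs)) := by
            rw [ht, hrr, if_neg hd]; simp [pvMapHead]

theorem pvLoopA_eq (xs : List Int) : ∀ (out : List (List Int)) (cur : List Int) (r : Int),
    pvLoopA out cur r xs =
      out ++ (pvRunsFrom cur r xs).filter (fun g => decide (g.length > 2)) := by
  induction xs with
  | nil => intro out cur r; by_cases h : cur.length > 2 <;> simp [pvLoopA, pvRunsFrom, h]
  | cons x xs ih =>
    intro out cur r
    by_cases hd : x - r = 1
    · simp [pvLoopA, pvRunsFrom, hd, ih]
    · by_cases h2 : cur.length > 2 <;>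
        simp [pvLoopA, pvRunsFrom, hd, h2, ih]

theorem pvPorts_agree (jolts : List Int) :
    find_contiguous_1_jolt_diffs jolts = find_contiguous_1_jolt_diffs_alt jolts := by
  have hB : find_contiguous_1_jolt_diffs_alt jolts =
      (pvRuns (0 :: jolts)).filter (fun g => decide (g.length > 2)) := by
    unfold find_contiguous_1_jolt_diffs_alt
    rw [PySem.List.foldl_append_ite_eq_filter, List.foldl_reverse,
      pvFoldr_eq_runs_reverse, List.reverse_reverse]
    simp
  have hA : find_contiguous_1_jolt_diffs jolts =
      (pvRuns (0 :: jolts)).filter (fun g => decide (g.length > 2)) := by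
    unfold find_contiguous_1_jolt_diffs
    rw [pvLoopA_eq]
    have := pvRunsFrom_eq_mapHead jolts [] 0
    simp only [List.nil_append] at this
    rw [this]
    obtain ⟨t, gs, ht⟩ := pvRuns_cons_shape 0 jolts
    simp [ht, pvMapHead]
  rw [hA, hB]

-- ===== VERDICT (by name: the statement is the Claim_ definition above) =====
theorem find_contiguous_1_jolt_diffs_spec : Claim_equal_find_contiguous_1_jolt_diffs := by
  intro jolts _
  unfold Spec_find_contiguous_1_jolt_diffs
  exact pvPorts_agree jolts
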